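-- pv_equiv track=rewrite | github.com/JohnCRuf/alderman_machine | tasks/data_scrape_menu/code/reading_functions.py | location_parenthesis_filter
-- ===== SOURCE A (Python) =====
-- def location_parenthesis_filter(string):
--     direction_list = ["N", "S", "E", "W"]
--     front_parenthesis_error_list = [")" + direction for direction in direction_list]
--     front_correction_list = [") " + direction for direction in direction_list]
--     back_parenthesis_error_list = [direction + "(" for direction in direction_list]
--     back_correction_list = [direction + " (" for direction in direction_list]
--     for front_error, front_correction in zip(front_parenthesis_error_list, front_correction_list):
--         string = string.replace(front_error, front_correction)
--     for back_error, back_correction in zip(back_parenthesis_error_list, back_correction_list):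
--         string = string.replace(back_error, back_correction)
--     return string
-- ===== SOURCE B (Python) =====
-- def location_parenthesis_filter(string):
--     dirs = "NSEW"
--     out = []
--     prev = None
--     for ch in string:
--         if prev is not None and ((prev == ")" and ch in dirs) or (prev in dirs and ch == "(")):
--             out.append(" ")
--         out.append(ch)
--         prev = ch
--     return "".join(out)
-- ===== Notes on version B (the rewrite author's own statement) =====
-- stated objective: simpler
-- what changed: Replaced the eight sequential str.replace passes over the whole string with a single left-to-right pass that keeps only the previous character as state and inserts a space at each flagged parenthesis-direction adjacency.
import Mathlib
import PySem

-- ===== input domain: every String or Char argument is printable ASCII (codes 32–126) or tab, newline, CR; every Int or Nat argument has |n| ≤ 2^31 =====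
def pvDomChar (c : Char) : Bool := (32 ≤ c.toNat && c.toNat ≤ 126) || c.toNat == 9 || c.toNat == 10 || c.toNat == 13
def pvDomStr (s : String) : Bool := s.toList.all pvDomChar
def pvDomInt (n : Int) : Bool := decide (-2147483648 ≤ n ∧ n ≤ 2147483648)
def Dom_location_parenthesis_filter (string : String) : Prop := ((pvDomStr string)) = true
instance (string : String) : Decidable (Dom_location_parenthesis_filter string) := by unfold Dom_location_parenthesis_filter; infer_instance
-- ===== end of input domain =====

-- ===== PORT A =====
-- B replaces A's eight sequential str.replace scans by a single left-to-right pass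
-- keeping only the previous character as state (objective: simpler).
def location_parenthesis_filter (string : String) : String :=
  let direction_list : List String := ["N", "S", "E", "W"]
  let front_parenthesis_error_list := direction_list.map (fun d => ")" ++ d)
  let front_correction_list := direction_list.map (fun d => ") " ++ d)
  let back_parenthesis_error_list := direction_list.map (fun d => d ++ "(")
  let back_correction_list := direction_list.map (fun d => d ++ " (")
  let s1 := (front_parenthesis_error_list.zip front_correction_list).foldl
      (fun s p => PySem.Str.replace s p.1 p.2) string
  (back_parenthesis_error_list.zip back_correction_list).foldl
      (fun s p => PySem.Str.replace s p.1 p.2) s1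

-- ===== PORT B =====
def pvIsDir (c : Char) : Bool := c == 'N' || c == 'S' || c == 'E' || c == 'W'

def pvPair (p c : Char) : Bool := (p == ')' && pvIsDir c) || (pvIsDir p && c == '(')

def location_parenthesis_filter_alt (string : String) : String :=
  let r := string.toList.foldl
    (fun (st : List Char × Option Char) ch =>
      (ch :: (if (match st.2 with | some p => pvPair p ch | none => false)
              then ' ' :: st.1 else st.1), some ch))
    ([], none)
  String.ofList r.1.reverse

-- ===== PRECONDITION & SPEC =====
def Spec_location_parenthesis_filter (string : String) (out : String) : Prop := out = location_parenthesis_filter_alt string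
instance (string : String) (out : String) : Decidable (Spec_location_parenthesis_filter string out) := by unfold Spec_location_parenthesis_filter; infer_instance

-- ===== CLAIM (what is proved, stated in full; the proofs are below) =====
def Claim_equal_location_parenthesis_filter : Prop := ∀ (string : String), Dom_location_parenthesis_filter string → Spec_location_parenthesis_filter string (location_parenthesis_filter string)

-- ===== LEMMAS AND PROOFS =====

-- emit P p t: output after the previous character p, inserting ' ' before c when P p c
def pvEmit (P : Char → Char → Bool) : Char → List Char → List Char
  | _, [] => []
  | p, c :: t => if P p c then ' ' :: c :: pvEmit P c t else c :: pvEmit P c t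

def pvMulti (P : Char → Char → Bool) : List Char → List Char
  | [] => []
  | a :: t => a :: pvEmit P a t

def pvP1 (c d : Char) : Char → Char → Bool := fun a b => a == c && b == d

theorem pvEmit_eq_multi (P : Char → Char → Bool) (p : Char) (t : List Char)
    (h : ∀ x, P p x = false) : pvEmit P p t = pvMulti P t := by
  cases t with
  | nil => rfl
  | cons x r => simp [pvEmit, pvMulti, h x]

-- a single str.replace of "cd" by "c d" (c ≠ d) is the one-pair single pass
theorem pvGo_eq (c d : Char) (h : c ≠ d) :
    ∀ (fuel : Nat) (l acc : List Char), l.length ≤ fuel →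
      PySem.Chars.replace.go [c, d] [c, ' ', d] fuel l acc
        = acc.reverse ++ pvMulti (pvP1 c d) l := by
  intro fuel
  induction fuel with
  | zero =>
    intro l acc hl
    have : l = [] := by cases l <;> simp_all
    subst this
    simp [PySem.Chars.replace.go, pvMulti]
  | succ f ih =>
    intro l acc hl
    cases l with
    | nil => simp [PySem.Chars.replace.go, pvMulti]
    | cons a t =>
      by_cases hp : List.isPrefixOf [c, d] (a :: t) = true
      · have hac : a = c := by
          cases t <;> simp [List.isPrefixOf] at hp
          exact hp.1.symm
        subst hac
        obtain ⟨t', rfl⟩ : ∃ t', t = d :: t' := by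
          cases t with
          | nil => simp [List.isPrefixOf] at hp
          | cons b r =>
            simp [List.isPrefixOf] at hp
            exact ⟨r, by rw [hp]⟩
        have hlen : t'.length ≤ f := by simp at hl; omega
        have hdd : ∀ x, pvP1 a d d x = false := by
          intro x; simp [pvP1]; intro h'; exact absurd h'.symm h
        simp only [PySem.Chars.replace.go, hp, if_pos]
        rw [show List.drop [a, d].length (a :: d :: t') = t' from rfl,
            ih t' ([a, ' ', d].reverse ++ acc) hlen]
        simp [pvMulti, pvEmit, pvP1, pvEmit_eq_multi _ _ _ hdd]
      · have hp' : List.isPrefixOf [c, d] (a :: t) = false := by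
          rw [← Bool.not_eq_true]; exact hp
        have hlen : t.length ≤ f := by simp at hl; omega
        have hmt : pvMulti (pvP1 c d) t = pvEmit (pvP1 c d) a t := by
          cases t with
          | nil => rfl
          | cons b r =>
            have hab : pvP1 c d a b = false := by
              cases hq : pvP1 c d a b with
              | false => rfl
              | true =>
                simp [pvP1] at hq
                obtain ⟨rfl, rfl⟩ := hq
                simp [List.isPrefixOf] at hp'
            simp [pvMulti, pvEmit, hab]
        simp only [PySem.Chars.replace.go, hp', Bool.false_eq_true, if_false]
        rw [ih t (a :: acc) hlen,
            show pvMulti (pvP1 c d) (a :: t) = a :: pvEmit (pvP1 c d) a t from rfl, ← hmt]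
        simp

theorem pvReplace_eq (c d : Char) (h : c ≠ d) (l : List Char) :
    PySem.Chars.replace l [c, d] [c, ' ', d] = pvMulti (pvP1 c d) l := by
  have := pvGo_eq c d h l.length l [] (le_refl _)
  simpa [PySem.Chars.replace] using this

theorem pvEmit_comm (P : Char → Char → Bool) (c d : Char)
    (hc : c ≠ ' ') (hd : d ≠ ' ') (hP : P c d = false) :
    ∀ (t : List Char) (a : Char),
      pvEmit (pvP1 c d) a (pvEmit P a t)
        = pvEmit (fun x y => P x y || pvP1 c d x y) a t := by
  intro t
  induction t with
  | nil => intro a; rfl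
  | cons x r ih =>
    intro a
    have hsp1 : ∀ a', pvP1 c d a' ' ' = false := by
      intro a'; simp [pvP1, Ne.symm hd]
    have hsp2 : ∀ y, pvP1 c d ' ' y = false := by
      intro y; simp [pvP1, Ne.symm hc]
    by_cases hax : P a x = true
    · have haxcd : pvP1 c d a x = false := by
        cases h' : pvP1 c d a x with
        | false => rfl
        | true =>
          simp [pvP1] at h'
          obtain ⟨rfl, rfl⟩ := h'
          rw [hax] at hP
          exact absurd hP (by simp)
      simp [pvEmit, hax, hsp1, hsp2, ih, haxcd]
    · have hax' : P a x = false := by simpa using hax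
      simp [pvEmit, hax', ih]

theorem pvMulti_comm (P : Char → Char → Bool) (c d : Char)
    (hc : c ≠ ' ') (hd : d ≠ ' ') (hP : P c d = false) (l : List Char) :
    pvMulti (pvP1 c d) (pvMulti P l)
      = pvMulti (fun x y => P x y || pvP1 c d x y) l := by
  cases l with
  | nil => rfl
  | cons a t => simpa [pvMulti] using pvEmit_comm P c d hc hd hP t a

theorem pvEmit_congr (P Q : Char → Char → Bool) (h : ∀ a b, P a b = Q a b) :
    ∀ (t : List Char) (p : Char), pvEmit P p t = pvEmit Q p t := by
  intro t
  induction t with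
  | nil => intro p; rfl
  | cons x r ih => intro p; simp [pvEmit, h p x, ih x]

theorem pvMulti_congr (P Q : Char → Char → Bool) (h : ∀ a b, P a b = Q a b)
    (l : List Char) : pvMulti P l = pvMulti Q l := by
  cases l with
  | nil => rfl
  | cons a t => simp [pvMulti, pvEmit_congr P Q h t a]

theorem pvFoldl_emit :
    ∀ (t : List Char) (out : List Char) (p : Char),
      (t.foldl (fun (st : List Char × Option Char) ch =>
          (ch :: (if (match st.2 with | some q => pvPair q ch | none => false)
                  then ' ' :: st.1 else st.1), some ch)) (out, some p)).1
        = (pvEmit pvPair p t).reverse ++ out := by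
  intro t
  induction t with
  | nil => intro out p; simp [pvEmit]
  | cons x r ih =>
    intro out p
    by_cases hpx : pvPair p x = true
    · simp [List.foldl, hpx, ih, pvEmit]
    · simp [List.foldl, hpx, ih, pvEmit]

theorem pvAlt_eq (s : String) :
    location_parenthesis_filter_alt s = String.ofList (pvMulti pvPair s.toList) := by
  unfold location_parenthesis_filter_alt
  cases hs : s.toList with
  | nil => simp [pvMulti]
  | cons a t => simp [List.foldl, pvFoldl_emit, pvMulti]

theorem pvPointwise (a b : Char) :
    ((((((((pvP1 ')' 'N' a b || pvP1 ')' 'S' a b) || pvP1 ')' 'E' a b) || pvP1 ')' 'W' a b)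
      || pvP1 'N' '(' a b) || pvP1 'S' '(' a b) || pvP1 'E' '(' a b) || pvP1 'W' '(' a b))
      = pvPair a b := by
  rw [Bool.eq_iff_iff]
  simp [pvP1, pvPair, pvIsDir]
  tauto

theorem pvChainList (l : List Char) :
    PySem.Chars.replace (PySem.Chars.replace (PySem.Chars.replace (PySem.Chars.replace
      (PySem.Chars.replace (PySem.Chars.replace (PySem.Chars.replace (PySem.Chars.replace
        l [')', 'N'] [')', ' ', 'N']) [')', 'S'] [')', ' ', 'S']) [')', 'E'] [')', ' ', 'E'])
        [')', 'W'] [')', ' ', 'W']) ['N', '('] ['N', ' ', '(']) ['S', '('] ['S', ' ', '('])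
        ['E', '('] ['E', ' ', '(']) ['W', '('] ['W', ' ', '(']
      = pvMulti pvPair l := by
  rw [pvReplace_eq ')' 'N' (by decide), pvReplace_eq ')' 'S' (by decide),
      pvReplace_eq ')' 'E' (by decide), pvReplace_eq ')' 'W' (by decide),
      pvReplace_eq 'N' '(' (by decide), pvReplace_eq 'S' '(' (by decide),
      pvReplace_eq 'E' '(' (by decide), pvReplace_eq 'W' '(' (by decide)]
  rw [pvMulti_comm (pvP1 ')' 'N') ')' 'S' (by decide) (by decide) (by decide)]
  rw [pvMulti_comm (fun x y => pvP1 ')' 'N' x y || pvP1 ')' 'S' x y)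
        ')' 'E' (by decide) (by decide) (by decide)]
  rw [pvMulti_comm (fun x y => (pvP1 ')' 'N' x y || pvP1 ')' 'S' x y) || pvP1 ')' 'E' x y)
        ')' 'W' (by decide) (by decide) (by decide)]
  rw [pvMulti_comm (fun x y => ((pvP1 ')' 'N' x y || pvP1 ')' 'S' x y) || pvP1 ')' 'E' x y)
        || pvP1 ')' 'W' x y) 'N' '(' (by decide) (by decide) (by decide)]
  rw [pvMulti_comm (fun x y => (((pvP1 ')' 'N' x y || pvP1 ')' 'S' x y) || pvP1 ')' 'E' x y)
        || pvP1 ')' 'W' x y) || pvP1 'N' '(' x y) 'S' '(' (by decide) (by decide) (by decide)]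
  rw [pvMulti_comm (fun x y => ((((pvP1 ')' 'N' x y || pvP1 ')' 'S' x y) || pvP1 ')' 'E' x y)
        || pvP1 ')' 'W' x y) || pvP1 'N' '(' x y) || pvP1 'S' '(' x y)
        'E' '(' (by decide) (by decide) (by decide)]
  rw [pvMulti_comm (fun x y => (((((pvP1 ')' 'N' x y || pvP1 ')' 'S' x y) || pvP1 ')' 'E' x y)
        || pvP1 ')' 'W' x y) || pvP1 'N' '(' x y) || pvP1 'S' '(' x y) || pvP1 'E' '(' x y)
        'W' '(' (by decide) (by decide) (by decide)]
  exact pvMulti_congr _ pvPair pvPointwise l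

-- ===== VERDICT (by name: the statement is the Claim_ definition above) =====
theorem location_parenthesis_filter_spec : Claim_equal_location_parenthesis_filter := by
  intro s _
  show location_parenthesis_filter s = location_parenthesis_filter_alt s
  rw [pvAlt_eq]
  unfold location_parenthesis_filter
  have hz1 : ((["N", "S", "E", "W"].map (fun d => ")" ++ d)).zip
      (["N", "S", "E", "W"].map (fun d => ") " ++ d)))
      = [(")N", ") N"), (")S", ") S"), (")E", ") E"), (")W", ") W")] := by decide
  have hz2 : ((["N", "S", "E", "W"].map (fun d => d ++ "(")).zip
      (["N", "S", "E", "W"].map (fun d => d ++ " (")))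
      = [("N(", "N ("), ("S(", "S ("), ("E(", "E ("), ("W(", "W (")] := by decide
  simp only [hz1, hz2, List.foldl_cons, List.foldl_nil]
  simp only [PySem.Str.replace, String.toList_ofList,
    show (")N" : String).toList = [')', 'N'] from by decide,
    show (") N" : String).toList = [')', ' ', 'N'] from by decide,
    show (")S" : String).toList = [')', 'S'] from by decide,
    show (") S" : String).toList = [')', ' ', 'S'] from by decide,
    show (")E" : String).toList = [')', 'E'] from by decide,
    show (") E" : String).toList = [')', ' ', 'E'] from by decide,
    show (")W" : String).toList = [')', 'W'] from by decide,
    show (") W" : String).toList = [')', ' ', 'W'] from by decide,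
    show ("N(" : String).toList = ['N', '('] from by decide,
    show ("N (" : String).toList = ['N', ' ', '('] from by decide,
    show ("S(" : String).toList = ['S', '('] from by decide,
    show ("S (" : String).toList = ['S', ' ', '('] from by decide,
    show ("E(" : String).toList = ['E', '('] from by decide,
    show ("E (" : String).toList = ['E', ' ', '('] from by decide,
    show ("W(" : String).toList = ['W', '('] from by decide,
    show ("W (" : String).toList = ['W', ' ', '('] from by decide]
  exact congrArg String.ofList (pvChainList s.toList)
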